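-- pv_equiv track=rewrite | github.com/sayseong/pokeemerald-expansion | python_tools/translate_skills.py | convert_description_to_multiline
-- ===== SOURCE A (Python) =====
-- def convert_description_to_multiline(description):
--     if not isinstance(description, str):
--         return None
--     # 替换中文字符为英文字符
--     split_text = description.split('\\n')
--
--     # 格式化输出为需要的三段，并处理最后一段不加\\n
--     formatted_text = [f'"{part}\\\\n"' for part in split_text[:-1]]  # 所有除最后一段外加\\n
--     formatted_text.append(f'"{split_text[-1]}"')  # 最后一段不加\\n
--
--     # 拼接成最终的描述
--     description = '\n\\t\\t\\t'.join(formatted_text)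
--     final=r'.description = COMPOUND_STRING(\n\t\t\t' + description+ '),'
--     return final
-- ===== SOURCE B (Python) =====
-- def convert_description_to_multiline(description):
--     if not isinstance(description, str):
--         return None
--     # Single left-to-right character scan (no split/join of parts): copy each
--     # character, replacing every literal "\n" with the close-quote / newline /
--     # indent / open-quote glue.
--     pieces = ['.description = COMPOUND_STRING(\\n\\t\\t\\t"']
--     i = 0
--     n = len(description)
--     while i < n:
--         if description.startswith('\\n', i):
--             pieces.append('\\\\n"\n\\t\\t\\t"')
--             i += 2
--         else:
--             pieces.append(description[i])
--             i += 1
--     pieces.append('"),')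
--     return ''.join(pieces)
-- ===== Notes on version B (the rewrite author's own statement) =====
-- stated objective: alternative
-- what changed: A splits the string into parts, wraps all-but-last with a comprehension, appends a special-cased last part and joins twice-staged; B never builds parts at all: one left-to-right character scan copies each character and rewrites every literal \n into the close-quote/newline/indent/open-quote glue in place.
import Mathlib
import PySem

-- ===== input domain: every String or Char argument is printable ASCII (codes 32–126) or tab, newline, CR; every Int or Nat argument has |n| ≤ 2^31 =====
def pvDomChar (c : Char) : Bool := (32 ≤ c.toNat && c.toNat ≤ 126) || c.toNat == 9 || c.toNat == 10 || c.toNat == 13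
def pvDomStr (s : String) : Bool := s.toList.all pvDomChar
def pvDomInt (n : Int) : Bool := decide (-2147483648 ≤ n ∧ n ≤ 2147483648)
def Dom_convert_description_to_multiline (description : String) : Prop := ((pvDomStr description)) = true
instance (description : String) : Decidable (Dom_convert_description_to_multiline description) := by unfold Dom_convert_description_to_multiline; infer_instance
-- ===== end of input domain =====

-- B replaces A's split / wrap-all-but-last / append-last / join pipeline by a single
-- left-to-right character scan that rewrites each literal "\n" in place; objective: simpler.

-- r'.description = COMPOUND_STRING(\n\t\t\t' — shared literal prefix of both programs' output
def pvHeader : List Char := ['.','d','e','s','c','r','i','p','t','i','o','n',' ','=',' ','C','O','M','P','O','U','N','D','_','S','T','R','I','N','G','(','\\','n','\\','t','\\','t','\\','t']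

-- ===== PORT A =====
def convert_description_to_multiline (description : String) : Option String :=
  -- isinstance(description, str) is always true for a String argument
  -- split_text = description.split('\n')  (the two-char separator backslash,'n')
  let split_text := PySem.Chars.splitOn description.toList ['\\', 'n']
  -- formatted_text = [f'"{part}\\n"' for part in split_text[:-1]]
  let formatted_text := (PySem.List.slice split_text none (some (-1))).map
      (fun part => '"' :: (part ++ ['\\', '\\', 'n', '"']))
  -- formatted_text.append(f'"{split_text[-1]}"')
  let formatted_text := formatted_text ++ ['"' :: (PySem.List.pyGetD split_text (-1) [] ++ ['"'])]
  -- description = '\n\\t\\t\\t'.join(formatted_text)  (real newline, then literal \t\t\t)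
  let desc := PySem.Chars.join ['\n', '\\', 't', '\\', 't', '\\', 't'] formatted_text
  some (String.ofList (pvHeader ++ desc ++ [')', ',']))

-- ===== PORT B =====
-- the glue B emits for each literal "\n": close quote, real newline, indent, open quote
def pvGlue : List Char := ['\\', '\\', 'n', '"', '\n', '\\', 't', '\\', 't', '\\', 't', '"']

-- Source B's while loop over the index: structural recursion over the remaining characters;
-- the if mirrors 'description.startswith("\\n", i)' (a two-character test)
def pvScan : List Char → List Char
  | [] => []
  | [c] => [c]
  | c :: d :: rest =>
    if c = '\\' ∧ d = 'n' then pvGlue ++ pvScan rest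
    else c :: pvScan (d :: rest)


def convert_description_to_multiline_alt (description : String) : Option String :=
  -- pieces = [header+'"'] ; scan ; pieces.append('"),') ; ''.join(pieces)
  some (String.ofList ((pvHeader ++ ['"']) ++ pvScan description.toList ++ ['"', ')', ',']))

-- ===== PRECONDITION & SPEC =====
def Spec_convert_description_to_multiline (description : String) (out : Option String) : Prop := out = convert_description_to_multiline_alt description
instance (description : String) (out : Option String) : Decidable (Spec_convert_description_to_multiline description out) := by unfold Spec_convert_description_to_multiline; infer_instance

-- ===== CLAIM (what is proved, stated in full; the proofs are below) =====
def Claim_equal_convert_description_to_multiline : Prop := ∀ (description : String), Dom_convert_description_to_multiline description → Spec_convert_description_to_multiline description (convert_description_to_multiline description)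

-- ===== LEMMAS AND PROOFS =====

-- splitOn never returns the empty list (its worker always delivers at least one piece)
theorem pv_splitOn_go_ne_nil (sep : List Char) :
    ∀ (fuel : Nat) (l cur : List Char) (acc : List (List Char)),
      PySem.Chars.splitOn.go sep fuel l cur acc ≠ [] := by
  intro fuel
  induction fuel with
  | zero => intro l cur acc; simp [PySem.Chars.splitOn.go]
  | succ n ih =>
    intro l cur acc
    cases l with
    | nil => simp [PySem.Chars.splitOn.go]
    | cons c rest =>
      simp only [PySem.Chars.splitOn.go]
      split
      · exact ih _ _ _
      · exact ih _ _ _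

theorem pv_splitOn_ne_nil (s sep : List Char) : PySem.Chars.splitOn s sep ≠ [] :=
  pv_splitOn_go_ne_nil sep _ s [] []

-- join with sep over nonempty l, prefixed head: join sep (x :: l) = x ++ sep ++ join sep l
theorem pv_join_cons_of_ne_nil (sep x : List Char) (l : List (List Char)) (h : l ≠ []) :
    PySem.Chars.join sep (x :: l) = x ++ sep ++ PySem.Chars.join sep l := by
  cases l with
  | nil => exact absurd rfl h
  | cons y l' => exact PySem.Chars.join_cons_cons sep x y l'

-- join over a nonempty list with one more piece at the end
theorem pv_join_snoc (sep y : List Char) :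
    ∀ (xs : List (List Char)), xs ≠ [] →
      PySem.Chars.join sep (xs ++ [y]) = PySem.Chars.join sep xs ++ sep ++ y := by
  intro xs
  induction xs with
  | nil => intro h; exact absurd rfl h
  | cons x xs' ih =>
    intro _
    cases xs' with
    | nil => simp [PySem.Chars.join_cons_cons, PySem.Chars.join_singleton]
    | cons z zs =>
      have hne : (z :: zs) ≠ [] := by simp
      rw [List.cons_append, pv_join_cons_of_ne_nil _ _ _ (by simp),
        ih hne, pv_join_cons_of_ne_nil _ _ _ hne]
      simp

-- extending the LAST piece extends the joined result
theorem pv_join_snoc_append (sep y z : List Char) (xs : List (List Char)) :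
    PySem.Chars.join sep (xs ++ [y ++ z]) = PySem.Chars.join sep (xs ++ [y]) ++ z := by
  cases xs with
  | nil => simp [PySem.Chars.join_singleton]
  | cons x xs' =>
    rw [pv_join_snoc sep _ _ (by simp), pv_join_snoc sep _ _ (by simp)]
    simp

-- the invariant of splitOn's worker against B's scan: joining what go still produces
-- equals joining the pieces already settled (acc, reversed, plus the open piece cur)
-- followed by the scan of the unread input
-- defining equation of pvScan on a two-character head
theorem pvScan_cons_cons (c d : Char) (rs : List Char) :
    pvScan (c :: d :: rs) =
      if c = '\\' ∧ d = 'n' then pvGlue ++ pvScan rs else c :: pvScan (d :: rs) := rfl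

-- the invariant of splitOn's worker against B's scan: joining what go still produces
-- equals joining the pieces already settled (acc, reversed, plus the open piece cur)
-- followed by the scan of the unread input
theorem pv_go_scan :
    ∀ (fuel : Nat) (l cur : List Char) (acc : List (List Char)), l.length < fuel →
      PySem.Chars.join pvGlue (PySem.Chars.splitOn.go ['\\', 'n'] fuel l cur acc)
        = PySem.Chars.join pvGlue (acc.reverse ++ [cur.reverse]) ++ pvScan l := by
  intro fuel
  induction fuel with
  | zero => intro l cur acc h; omega
  | succ n ih =>
    intro l cur acc h
    cases l with
    | nil => simp [PySem.Chars.splitOn.go, pvScan]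
    | cons c rest =>
      cases rest with
      | nil =>
        have hpre : List.isPrefixOf ['\\', 'n'] [c] = false := by
          simp [List.isPrefixOf]
        simp only [PySem.Chars.splitOn.go, hpre, Bool.false_eq_true, if_false]
        rw [ih [] (c :: cur) acc (by simp at h ⊢; omega),
          show (c :: cur).reverse = cur.reverse ++ [c] from by simp,
          pv_join_snoc_append]
        simp [pvScan]
      | cons d rs =>
        by_cases hcd : c = '\\' ∧ d = 'n'
        · obtain ⟨hc, hd⟩ := hcd
          subst hc; subst hd
          have hpre : List.isPrefixOf ['\\', 'n'] ('\\' :: 'n' :: rs) = true := by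
            simp [List.isPrefixOf]
          simp only [PySem.Chars.splitOn.go, hpre, if_true]
          rw [show List.drop (['\\', 'n'] : List Char).length ('\\' :: 'n' :: rs) = rs from rfl,
            ih rs [] (cur.reverse :: acc) (by simp at h ⊢; omega)]
          simp only [List.reverse_nil, List.reverse_cons, List.append_assoc]
          rw [← List.append_assoc,
            pv_join_snoc pvGlue [] (acc.reverse ++ [cur.reverse]) (by simp),
            pvScan_cons_cons, if_pos ⟨rfl, rfl⟩]
          simp
        · have hpre : List.isPrefixOf ['\\', 'n'] (c :: d :: rs) = false := by
            simp only [List.isPrefixOf, Bool.and_eq_false_iff]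
            by_cases hc : c = '\\'
            · subst hc
              have hd : d ≠ 'n' := fun hd => hcd ⟨rfl, hd⟩
              right
              simp
              exact fun hn => hd hn.symm
            · left
              simp
              exact fun hn => hc hn.symm
          simp only [PySem.Chars.splitOn.go, hpre, Bool.false_eq_true, if_false]
          rw [ih (d :: rs) (c :: cur) acc (by simp at h ⊢; omega),
            show (c :: cur).reverse = cur.reverse ++ [c] from by simp,
            pv_join_snoc_append, pvScan_cons_cons, if_neg hcd]
          simp

-- B's scan equals the composite join over A's split
theorem pv_scan_eq_join (s : List Char) :
    pvScan s = PySem.Chars.join pvGlue (PySem.Chars.splitOn s ['\\', 'n']) := by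
  unfold PySem.Chars.splitOn
  rw [pv_go_scan (s.length + 1) s [] [] (by omega)]
  simp [PySem.Chars.join_singleton]

-- A's "wrap every piece but the last, append the wrapped last, join" equals
-- B's quotes wrapped around the composite join over the same pieces.
theorem pv_key (parts : List (List Char)) (h : parts ≠ []) :
    PySem.Chars.join ['\n', '\\', 't', '\\', 't', '\\', 't']
      (parts.dropLast.map (fun part => '"' :: (part ++ ['\\', '\\', 'n', '"']))
        ++ ['"' :: (parts.getLast h ++ ['"'])])
    = '"' :: (PySem.Chars.join pvGlue parts ++ ['"']) := by
  induction parts with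
  | nil => exact absurd rfl h
  | cons p rest ih =>
    cases rest with
    | nil => simp [PySem.Chars.join_singleton]
    | cons q rs =>
      have hne : (q :: rs) ≠ [] := by simp
      have ihx := ih hne
      have hgl : (p :: q :: rs).getLast h = (q :: rs).getLast hne := by
        simp [List.getLast]
      rw [List.dropLast_cons_of_ne_nil hne, List.map_cons, List.cons_append,
        pv_join_cons_of_ne_nil _ _ _ (by simp), hgl, ihx,
        pv_join_cons_of_ne_nil _ _ _ hne]
      simp [pvGlue]

-- ===== VERDICT (by name: the statement is the Claim_ definition above) =====
theorem convert_description_to_multiline_spec : Claim_equal_convert_description_to_multiline := by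
  intro description _
  unfold Spec_convert_description_to_multiline
  unfold convert_description_to_multiline convert_description_to_multiline_alt
  have hne := pv_splitOn_ne_nil description.toList ['\\', 'n']
  simp only [PySem.List.slice_to_neg_one, PySem.List.pyGetD_neg_one _ [] hne,
    pv_key _ hne, pv_scan_eq_join]
  simp
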